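-- pv_equiv track=rewrite | github.com/Martiin542/Parcial-1-Martin-Simone | pruebas.py | contar_caracteristica
-- ===== SOURCE A (Python) =====
-- def contar_caracteristica(lista:list, clave:str)->dict:
--     diccionario_caracteristicas = {}
--     for personaje in lista:
--         if personaje[clave] in diccionario_caracteristicas:
--             diccionario_caracteristicas[personaje[clave]] += 1
--         else:
--             diccionario_caracteristicas[personaje[clave]] = 1
--     return diccionario_caracteristicas
-- ===== SOURCE B (Python) =====
-- def contar_caracteristica(lista: list, clave: str) -> dict:
--     valores = [personaje[clave] for personaje in lista]
--     return {v: valores.count(v) for v in dict.fromkeys(valores)}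
-- ===== Notes on version B (the rewrite author's own statement) =====
-- stated objective: alternative
-- what changed: Replaces A's single accumulating membership-test/increment dict pass with a two-phase decomposition: extract the value list, take its first-occurrence-ordered distinct values (dict.fromkeys), and build the result by a dict comprehension counting each distinct value with valores.count.
import Mathlib
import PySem

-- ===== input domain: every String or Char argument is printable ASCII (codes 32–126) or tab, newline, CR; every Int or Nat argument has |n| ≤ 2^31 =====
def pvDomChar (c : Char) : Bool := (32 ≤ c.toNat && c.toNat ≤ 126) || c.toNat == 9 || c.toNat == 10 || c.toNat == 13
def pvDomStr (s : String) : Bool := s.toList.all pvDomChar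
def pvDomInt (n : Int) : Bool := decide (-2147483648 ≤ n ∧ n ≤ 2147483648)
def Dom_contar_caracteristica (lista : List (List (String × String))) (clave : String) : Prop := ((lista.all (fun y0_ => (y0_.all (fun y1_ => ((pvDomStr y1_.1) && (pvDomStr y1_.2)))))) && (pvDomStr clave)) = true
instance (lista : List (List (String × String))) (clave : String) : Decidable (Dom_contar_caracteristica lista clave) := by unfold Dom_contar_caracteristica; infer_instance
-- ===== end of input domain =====

-- B counts by a two-phase decomposition (distinct values, then one count scan per value)
-- instead of A's single accumulating dict pass; same return value, alternative structure.

-- ===== PORT A =====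
-- personaje[clave] raises KeyError when absent; under Pre_ every lookup succeeds, so getD "" is exact there.
def contar_caracteristica (lista : List (List (String × String))) (clave : String) : List (String × Int) :=
  (lista.foldl (fun d personaje =>
      if PySem.Dict.contains d (PySem.Dict.getD (PySem.Dict.ofList personaje) clave "") then
        d.insert (PySem.Dict.getD (PySem.Dict.ofList personaje) clave "")
          (d.getD (PySem.Dict.getD (PySem.Dict.ofList personaje) clave "") 0 + 1)
      else d.insert (PySem.Dict.getD (PySem.Dict.ofList personaje) clave "") 1)
    PySem.Dict.empty).items

-- ===== PORT B =====
-- same KeyError note as A; getD "" is exact under Pre_.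
def contar_caracteristica_alt (lista : List (List (String × String))) (clave : String) : List (String × Int) :=
  (PySem.List.dedup (lista.map (fun personaje => PySem.Dict.getD (PySem.Dict.ofList personaje) clave ""))).map
    (fun v => (v, (PySem.List.count (lista.map (fun personaje => PySem.Dict.getD (PySem.Dict.ofList personaje) clave "")) v : Int)))

-- ===== PRECONDITION & SPEC =====
-- Pre_ excludes exactly the inputs where personaje[clave] raises KeyError (clave missing in some dict).
def Pre_contar_caracteristica (lista : List (List (String × String))) (clave : String) : Prop :=
  ∀ personaje ∈ lista, PySem.Dict.contains (PySem.Dict.ofList personaje) clave = true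
instance (lista : List (List (String × String))) (clave : String) : Decidable (Pre_contar_caracteristica lista clave) := by unfold Pre_contar_caracteristica; infer_instance
def pvWitness_contar_caracteristica : (List (List (String × String))) × String :=
  ([[("tipo", "mago")], [("tipo", "elfo")], [("tipo", "mago")]], "tipo")
def Spec_contar_caracteristica (lista : List (List (String × String))) (clave : String) (out : List (String × Int)) : Prop := out = contar_caracteristica_alt lista clave
instance (lista : List (List (String × String))) (clave : String) (out : List (String × Int)) : Decidable (Spec_contar_caracteristica lista clave out) := by unfold Spec_contar_caracteristica; infer_instance

-- ===== CLAIM (what is proved, stated in full; the proofs are below) =====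
def Claim_equal_contar_caracteristica : Prop := ∀ (lista : List (List (String × String))) (clave : String), Dom_contar_caracteristica lista clave → Pre_contar_caracteristica lista clave → Spec_contar_caracteristica lista clave (contar_caracteristica lista clave)

-- ===== LEMMAS AND PROOFS =====

-- A's if/else body is the canonical counting step.
theorem contar_body_eq (d : PySem.Dict String Int) (v : String) :
    (if PySem.Dict.contains d v then d.insert v (d.getD v 0 + 1) else d.insert v 1)
      = d.insert v (d.getD v 0 + 1) := by
  by_cases h : PySem.Dict.contains d v = true
  · simp [h]
  · have h' : PySem.Dict.contains d v = false := by simpa using h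
    simp [h, PySem.Dict.getD_of_not_contains (h := h')]

-- ===== VERDICT (by name: the statement is the Claim_ definition above) =====
theorem contar_caracteristica_spec : Claim_equal_contar_caracteristica := by
  intro lista clave _ _
  unfold Spec_contar_caracteristica contar_caracteristica contar_caracteristica_alt
  simp only [contar_body_eq]
  have hfm := List.foldl_map
      (f := fun personaje => PySem.Dict.getD (PySem.Dict.ofList personaje) clave "")
      (g := fun (d : PySem.Dict String Int) v => d.insert v (d.getD v 0 + 1))
      (l := lista) (init := PySem.Dict.empty)
  rw [← hfm]
  rw [PySem.Dict.foldl_insert_getD_add_one_eq_counter, PySem.Dict.items_counter]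
  simp [PySem.List.dedup_eq_ofList, PySem.List.count_eq]
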